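-- pv_equiv track=rewrite | github.com/barahona-research-group/ICE-NODE | icenode/ehr_model/coding_scheme.py | _code_ancestors_dots
-- ===== SOURCE A (Python) =====
-- def _code_ancestors_dots(code, include_itself=True):
--
--     ancestors = {code} if include_itself else set()
--     if code == 'root':
--         return ancestors
--     else:
--         ancestors.add('root')
--
--     indices = code.split('.')
--     for i in reversed(range(1, len(indices))):
--         parent = '.'.join(indices[0:i])
--         ancestors.add(parent)
--     return ancestors
-- ===== SOURCE B (Python) =====
-- def _code_ancestors_dots(code, include_itself=True):
--     ancestors = {code} if include_itself else set()
--     if code == 'root':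
--         return ancestors
--     ancestors.add('root')
--     parent = code
--     while True:
--         i = parent.rfind('.')
--         if i < 0:
--             break
--         parent = parent[:i]
--         ancestors.add(parent)
--     return ancestors
-- ===== Notes on version B (the rewrite author's own statement) =====
-- stated objective: alternative
-- what changed: B drops the split-into-segments/re-join passes entirely: it keeps one progressively truncated string, repeatedly cutting at the last dot (rfind + slice) and adding each truncation, instead of building a segment list and joining every prefix slice of it.
import Mathlib
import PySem

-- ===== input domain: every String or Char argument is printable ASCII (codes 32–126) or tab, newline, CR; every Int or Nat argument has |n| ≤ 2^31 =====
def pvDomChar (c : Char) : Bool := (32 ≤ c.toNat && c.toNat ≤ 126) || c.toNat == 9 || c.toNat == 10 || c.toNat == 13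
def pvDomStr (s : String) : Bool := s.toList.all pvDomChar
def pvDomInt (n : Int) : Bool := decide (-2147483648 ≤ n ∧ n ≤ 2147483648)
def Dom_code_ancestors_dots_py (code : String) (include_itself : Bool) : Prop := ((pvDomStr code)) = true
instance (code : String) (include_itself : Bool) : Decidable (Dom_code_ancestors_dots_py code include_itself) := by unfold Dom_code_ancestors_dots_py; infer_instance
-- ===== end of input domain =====

-- B replaces A's split-into-segments + join-of-every-prefix-slice passes by one progressively
-- truncated string: repeatedly cut at the last dot (rfind) and add each truncation (objective: alternative).

-- ===== PORT A =====
def code_ancestors_dots_py (code : String) (include_itself : Bool) : List String :=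
  let ancestors : PySem.Set String := if include_itself then PySem.Set.ofList [code] else PySem.Set.empty
  if code == "root" then ancestors
  else
    let ancestors := PySem.Set.add ancestors "root"
    let indices := (PySem.Str.split? code ".").getD []
    ((PySem.List.pyRange 1 (PySem.List.len indices) 1).reverse).foldl
      (fun acc i => PySem.Set.add acc (PySem.Str.join "." (PySem.List.slice indices (some 0) (some i)))) ancestors

-- ===== PORT B =====
-- termination lemma for the truncation loop: cutting at a found dot strictly shortens the string
theorem pvRfindGoSpec (s : List Char) (j : Nat) :
    PySem.Chars.rfind.go s ['.'] j = -1 ∨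
      (0 ≤ PySem.Chars.rfind.go s ['.'] j ∧ (PySem.Chars.rfind.go s ['.'] j).toNat ≤ j ∧
        ['.'] <+: s.drop (PySem.Chars.rfind.go s ['.'] j).toNat) := by
  induction j with
  | zero =>
    unfold PySem.Chars.rfind.go
    by_cases h : ['.'].isPrefixOf s
    · right
      rw [List.isPrefixOf_iff_prefix] at h
      simp [List.isPrefixOf_iff_prefix, h]
    · left; simp [h]
  | succ j ih =>
    unfold PySem.Chars.rfind.go
    by_cases h : ['.'].isPrefixOf (s.drop (j + 1))
    · right
      rw [List.isPrefixOf_iff_prefix] at h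
      simp only [List.isPrefixOf_iff_prefix, h, if_pos]
      refine ⟨by positivity, ?_, ?_⟩ <;> simp [h]
    · rcases ih with ih | ⟨h0, hle, hpre⟩
      · left; simp [h, ih]
      · right; simp only [h, Bool.false_eq_true, if_false, List.isPrefixOf_iff_prefix]
        exact ⟨h0, by omega, hpre⟩

theorem pvTruncLt (s : List Char) (h : ¬ PySem.Chars.rfind s ['.'] < 0) :
    (PySem.Chars.slice s none (some (PySem.Chars.rfind s ['.']))).length < s.length := by
  have hs := pvRfindGoSpec s s.length
  unfold PySem.Chars.rfind at *
  rcases hs with hs | ⟨h0, hle, hpre⟩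
  · omega
  · have hlt : (PySem.Chars.rfind.go s ['.'] s.length).toNat < s.length := by
      rcases hpre with ⟨t, ht⟩
      have : s.drop (PySem.Chars.rfind.go s ['.'] s.length).toNat ≠ [] := by
        rw [← ht]; simp
      have h2 := List.drop_eq_nil_iff.not.mp this
      omega
    rw [PySem.Chars.slice_eq_listSlice, PySem.List.slice_to _ h0]
    simp [hlt]

def altLoop (parent : List Char) (acc : PySem.Set String) : PySem.Set String :=
  let i := PySem.Chars.rfind parent ['.']
  if h : i < 0 then acc
  else
    let parent' := PySem.Chars.slice parent none (some i)
    altLoop parent' (PySem.Set.add acc (String.ofList parent'))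
termination_by parent.length
decreasing_by exact pvTruncLt parent h

def code_ancestors_dots_py_alt (code : String) (include_itself : Bool) : List String :=
  let ancestors : PySem.Set String := if include_itself then PySem.Set.ofList [code] else PySem.Set.empty
  if code == "root" then ancestors
  else altLoop code.toList (PySem.Set.add ancestors "root")

-- ===== PRECONDITION & SPEC =====
def Spec_code_ancestors_dots_py (code : String) (include_itself : Bool) (out : List String) : Prop := out = code_ancestors_dots_py_alt code include_itself
instance (code : String) (include_itself : Bool) (out : List String) : Decidable (Spec_code_ancestors_dots_py code include_itself out) := by unfold Spec_code_ancestors_dots_py; infer_instance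

-- ===== CLAIM (what is proved, stated in full; the proofs are below) =====
def Claim_equal_code_ancestors_dots_py : Prop := ∀ (code : String) (include_itself : Bool), Dom_code_ancestors_dots_py code include_itself → Spec_code_ancestors_dots_py code include_itself (code_ancestors_dots_py code include_itself)

-- ===== LEMMAS AND PROOFS =====

-- a plain structural version of Python's str.split('.') on char lists
def splitAux : List Char → List Char → List (List Char)
  | [], cur => [cur.reverse]
  | c :: rest, cur => if c = '.' then cur.reverse :: splitAux rest [] else splitAux rest (c :: cur)

theorem splitOnGo_eq (l : List Char) : ∀ (cur : List Char) (acc : List (List Char)) (fuel : Nat),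
    l.length < fuel →
    PySem.Chars.splitOn.go ['.'] fuel l cur acc = acc.reverse ++ splitAux l cur := by
  induction l with
  | nil =>
    intro cur acc fuel hf
    match fuel, hf with
    | fuel + 1, _ => unfold PySem.Chars.splitOn.go; simp [splitAux]
  | cons c rest ih =>
    intro cur acc fuel hf
    match fuel, hf with
    | fuel + 1, hf =>
      unfold PySem.Chars.splitOn.go
      by_cases hc : c = '.'
      · subst hc
        have hpre : ['.'].isPrefixOf ('.' :: rest) = true := by simp [List.isPrefixOf_iff_prefix]
        simp only [hpre, if_true, List.length_cons, List.length_nil, List.drop_succ_cons,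
          List.drop_zero]
        rw [ih [] (cur.reverse :: acc) fuel (by simpa using hf)]
        simp [splitAux]
      · have hpre : ['.'].isPrefixOf (c :: rest) = false := by
          have hnp : ¬ (['.'] <+: c :: rest) := by
            rintro ⟨t, ht⟩
            injection ht with h1 _
            exact hc h1.symm
          exact Bool.eq_false_iff.mpr (fun h => hnp (List.isPrefixOf_iff_prefix.mp h))
        simp only [hpre, Bool.false_eq_true, if_false]
        rw [ih (c :: cur) acc fuel (by simpa using hf), splitAux, if_neg hc]

theorem splitOn_eq (s : List Char) : PySem.Chars.splitOn s ['.'] = splitAux s [] := by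
  unfold PySem.Chars.splitOn
  rw [splitOnGo_eq s [] [] (s.length + 1) (by omega)]
  simp

theorem splitAux_ne_nil (s cur : List Char) : splitAux s cur ≠ [] := by
  cases s with
  | nil => simp [splitAux]
  | cons c rest => by_cases hc : c = '.' <;> simp [splitAux, hc, splitAux_ne_nil]

theorem splitAux_no_dot (s : List Char) (h : '.' ∉ s) : ∀ cur, splitAux s cur = [cur.reverse ++ s] := by
  induction s with
  | nil => intro cur; simp [splitAux]
  | cons c rest ih =>
    intro cur
    have hc : c ≠ '.' := fun hc => h (hc ▸ List.mem_cons_self)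
    rw [splitAux, if_neg hc, ih (fun hm => h (List.mem_cons_of_mem _ hm))]
    simp

theorem splitAux_append (a b : List Char) : ∀ cur, splitAux (a ++ '.' :: b) cur = splitAux a cur ++ splitAux b [] := by
  induction a with
  | nil => intro cur; simp [splitAux]
  | cons c rest ih =>
    intro cur
    by_cases hc : c = '.' <;> simp [splitAux, hc, ih]

theorem join_splitAux (s : List Char) : ∀ cur, PySem.Chars.join ['.'] (splitAux s cur) = cur.reverse ++ s := by
  induction s with
  | nil => intro cur; simp [splitAux, PySem.Chars.join_singleton]
  | cons c rest ih =>
    intro cur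
    by_cases hc : c = '.'
    · subst hc
      rw [splitAux, if_pos rfl]
      obtain ⟨z, t, hzt⟩ : ∃ z t, splitAux rest [] = z :: t := by
        cases hsa : splitAux rest [] with
        | nil => exact absurd hsa (splitAux_ne_nil rest [])
        | cons z t => exact ⟨z, t, rfl⟩
      rw [hzt, PySem.Chars.join_cons_cons]
      have := ih []
      rw [hzt] at this
      simp at this
      simp [this]
    · rw [splitAux, if_neg hc, ih (c :: cur)]
      simp

-- last-dot decomposition
theorem lastDotDecomp (s : List Char) (h : '.' ∈ s) : ∃ a b, s = a ++ '.' :: b ∧ '.' ∉ b := by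
  induction s with
  | nil => simp at h
  | cons c rest ih =>
    by_cases hr : '.' ∈ rest
    · obtain ⟨a, b, hab, hb⟩ := ih hr
      exact ⟨c :: a, b, by simp [hab], hb⟩
    · have hc : c = '.' := by
        rcases List.mem_cons.mp h with h' | h'
        · exact h'.symm
        · exact absurd h' hr
      exact ⟨[], rest, by simp [hc], hr⟩

theorem rfindGo_none (s : List Char) (j : Nat) (h : ∀ k, k ≤ j → ¬ ['.'] <+: s.drop k) :
    PySem.Chars.rfind.go s ['.'] j = -1 := by
  induction j with
  | zero =>
    unfold PySem.Chars.rfind.go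
    have := h 0 le_rfl
    simp only [List.drop_zero] at this
    simp [List.isPrefixOf_iff_prefix, this]
  | succ j ih =>
    unfold PySem.Chars.rfind.go
    have := h (j + 1) le_rfl
    simp only [List.isPrefixOf_iff_prefix, this, if_false]
    exact ih (fun k hk => h k (by omega))

theorem rfind_no_dot (s : List Char) (h : '.' ∉ s) : PySem.Chars.rfind s ['.'] = -1 := by
  unfold PySem.Chars.rfind
  refine rfindGo_none s s.length (fun k _ hpre => ?_)
  rcases hpre with ⟨t, ht⟩
  have : '.' ∈ s.drop k := by rw [← ht]; simp
  exact h (List.mem_of_mem_drop this)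

theorem rfindGo_last (a b : List Char) (hb : '.' ∉ b) :
    ∀ j, a.length ≤ j → PySem.Chars.rfind.go (a ++ '.' :: b) ['.'] j = a.length := by
  intro j
  induction j with
  | zero =>
    intro hj
    have ha : a = [] := List.eq_nil_of_length_eq_zero (by omega)
    subst ha
    unfold PySem.Chars.rfind.go
    simp [List.isPrefixOf_iff_prefix, List.prefix_cons_iff]
  | succ j ih =>
    intro hj
    unfold PySem.Chars.rfind.go
    by_cases he : a.length = j + 1
    · have : ['.'] <+: (a ++ '.' :: b).drop (j + 1) := by
        rw [← he, List.drop_append_of_le_length le_rfl]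
        simp
      simp [List.isPrefixOf_iff_prefix, this, he]
    · have hle : a.length ≤ j := by omega
      have hnp : ¬ ['.'] <+: (a ++ '.' :: b).drop (j + 1) := by
        intro hpre
        rcases hpre with ⟨t, ht⟩
        have hdef : (a ++ '.' :: b).drop (j + 1) = ('.' :: b).drop (j + 1 - a.length) := by
          have h3 : j + 1 = a.length + (j + 1 - a.length) := by omega
          rw [h3, List.drop_append]
          simp
        have hd2 : (j + 1 - a.length) = (j - a.length) + 1 := by omega
        have : '.' ∈ b := by
          have hmem : '.' ∈ ('.' :: b).drop (j + 1 - a.length) := by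
            rw [← hdef, ← ht]; simp
          rw [hd2, List.drop_succ_cons] at hmem
          exact List.mem_of_mem_drop hmem
        exact hb this
      simp only [List.isPrefixOf_iff_prefix]
      rw [if_neg (by simpa using hnp)]
      exact ih hle

theorem rfind_last (a b : List Char) (hb : '.' ∉ b) :
    PySem.Chars.rfind (a ++ '.' :: b) ['.'] = a.length := by
  unfold PySem.Chars.rfind
  exact rfindGo_last a b hb _ (by simp)

-- the main loop correspondence, at char level
theorem altLoop_eq_fold (s : List Char) : ∀ acc : PySem.Set String,
    altLoop s acc =
      ((PySem.List.pyRange 1 (splitAux s []).length 1).reverse).foldl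
        (fun ac i => PySem.Set.add ac (String.ofList (PySem.Chars.join ['.'] (List.take i.toNat (splitAux s []))))) acc := by
  induction hn : s.length using Nat.strong_induction_on generalizing s with
  | _ n ih =>
  intro acc
  by_cases hdot : '.' ∈ s
  · obtain ⟨a, b, hab, hb⟩ := lastDotDecomp s hdot
    subst hab
    have hrf : PySem.Chars.rfind (a ++ '.' :: b) ['.'] = a.length := rfind_last a b hb
    have hslice : PySem.Chars.slice (a ++ '.' :: b) none (some (a.length : Int)) = a := by
      rw [PySem.Chars.slice_eq_listSlice, PySem.List.slice_to _ (by exact_mod_cast Int.natCast_nonneg a.length)]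
      simp
    rw [altLoop]
    simp only [hrf]
    rw [dif_neg (by simp)]
    simp only [hslice]
    have hseg : splitAux (a ++ '.' :: b) [] = splitAux a [] ++ [b] := by
      rw [splitAux_append, splitAux_no_dot b hb]
      simp
    rw [hseg]
    have hm1 : 1 ≤ (splitAux a []).length := by
      cases hsa : splitAux a [] with
      | nil => exact absurd hsa (splitAux_ne_nil a [])
      | cons z t => simp [hsa]
    have hlen : (((splitAux a [] ++ [b]).length : Nat) : Int) = ((splitAux a []).length : Int) + 1 := by
      simp
    rw [hlen]
    rw [PySem.List.pyRange_one_append 1 ((splitAux a []).length : Int) (((splitAux a []).length : Int) + 1)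
      (by exact_mod_cast hm1) (by omega)]
    rw [PySem.List.pyRange_one_singleton ((splitAux a []).length : Int)]
    rw [List.reverse_append]
    simp only [List.reverse_cons, List.reverse_nil, List.nil_append, List.singleton_append,
      List.foldl_cons]
    have htake : List.take (((splitAux a []).length : Int)).toNat (splitAux a [] ++ [b]) = splitAux a [] := by
      simp
    rw [htake]
    have hjoin : PySem.Chars.join ['.'] (splitAux a []) = a := by simpa using join_splitAux a []
    rw [hjoin]
    have hcong : ((PySem.List.pyRange 1 ((splitAux a []).length : Int) 1).reverse).foldl
        (fun ac i => PySem.Set.add ac (String.ofList (PySem.Chars.join ['.'] (List.take i.toNat (splitAux a [] ++ [b])))))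
        (PySem.Set.add acc (String.ofList a)) =
        ((PySem.List.pyRange 1 ((splitAux a []).length : Int) 1).reverse).foldl
        (fun ac i => PySem.Set.add ac (String.ofList (PySem.Chars.join ['.'] (List.take i.toNat (splitAux a [])))))
        (PySem.Set.add acc (String.ofList a)) := by
      refine PySem.List.foldl_congr_mem _ _ _ _ (fun ac i hi => ?_)
      rw [List.mem_reverse] at hi
      have hi' := PySem.List.mem_pyRange_one.mp hi
      have hile : i.toNat ≤ (splitAux a []).length := by omega
      rw [List.take_append_of_le_length hile]
    rw [hcong]
    have hlta : a.length < n := by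
      rw [← hn]
      simp
    exact ih a.length hlta a rfl (PySem.Set.add acc (String.ofList a))
  · -- no dot: both sides are acc
    rw [altLoop]
    rw [dif_pos (by rw [rfind_no_dot s hdot]; omega)]
    rw [splitAux_no_dot s hdot []]
    simp [PySem.List.pyRange_one_eq_nil]

-- ===== VERDICT (by name: the statement is the Claim_ definition above) =====
theorem code_ancestors_dots_py_spec : Claim_equal_code_ancestors_dots_py := by
  intro code include_itself _
  unfold Spec_code_ancestors_dots_py code_ancestors_dots_py code_ancestors_dots_py_alt
  by_cases hroot : code == "root"
  · simp [hroot]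
  · simp only [hroot, Bool.false_eq_true, if_false]
    -- identify A's indices with the char-level segments
    have hsplit : PySem.Str.split? code "." = some ((splitAux code.toList []).map String.ofList) := by
      have hbr := PySem.Str.split?_map code "."
      have hdot : ("." : String).toList = ['.'] := by decide
      rw [hdot] at hbr
      unfold PySem.Chars.split? at hbr
      rw [splitOn_eq] at hbr
      simp only [List.isEmpty_cons, Bool.false_eq_true, if_false] at hbr
      cases hsp : PySem.Str.split? code "." with
      | none => rw [hsp] at hbr; simp at hbr
      | some L =>
        rw [hsp] at hbr
        simp only [Option.map_some, Option.some_inj] at hbr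
        congr 1
        rw [← hbr, List.map_map]
        simp [Function.comp_def]
    rw [hsplit]
    rw [altLoop_eq_fold]
    simp only [Option.getD_some]
    have hlen : PySem.List.len ((splitAux code.toList []).map String.ofList) = ((splitAux code.toList []).length : Int) := by
      simp [PySem.List.len]
    rw [hlen]
    refine PySem.List.foldl_congr_mem _ _ _ _ (fun ac i hi => ?_)
    rw [List.mem_reverse] at hi
    have hi' := PySem.List.mem_pyRange_one.mp hi
    have h0i : (0:Int) ≤ i := by omega
    congr 1
    apply String.toList_inj.mp
    rw [PySem.Str.toList_join]
    have hslice : PySem.List.slice ((splitAux code.toList []).map String.ofList) (some 0) (some i)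
        = List.take i.toNat ((splitAux code.toList []).map String.ofList) := by
      simp [pysem, h0i]
    rw [hslice, ← List.map_take]
    rw [show ("." : String).toList = ['.'] from by decide]
    rw [List.map_map]
    have hmc : List.map (String.toList ∘ String.ofList) (List.take i.toNat (splitAux code.toList []))
        = List.take i.toNat (splitAux code.toList []) := by
      simp [Function.comp_def]
    rw [hmc]
    simp
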